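-- pv_equiv track=rewrite | github.com/um-computacion-tm/scrabble-2023-EVAnci | game/board.py | validate_empty
-- ===== SOURCE A (Python) =====
-- def validate_empty(word, pos, horizontal):
--     row = pos[0]
--     column = pos[1]
--     for i in range(len(word)):
--         if row == 7 and column == 7:
--             return True
--         column += 1 if horizontal else 0
--         row += 1 if not horizontal else 0
--     return False
-- ===== SOURCE B (Python) =====
-- def validate_empty(word, pos, horizontal):
--     row, column = pos
--     n = len(word)
--     if horizontal:
--         return row == 7 and column <= 7 <= column + n - 1
--     return column == 7 and row <= 7 <= row + n - 1
-- ===== Notes on version B (the rewrite author's own statement) =====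
-- stated objective: faster
-- what changed: Replaced the per-cell scanning loop with a closed-form arithmetic check that the center (7,7) lies on the word's span.
import Mathlib
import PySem

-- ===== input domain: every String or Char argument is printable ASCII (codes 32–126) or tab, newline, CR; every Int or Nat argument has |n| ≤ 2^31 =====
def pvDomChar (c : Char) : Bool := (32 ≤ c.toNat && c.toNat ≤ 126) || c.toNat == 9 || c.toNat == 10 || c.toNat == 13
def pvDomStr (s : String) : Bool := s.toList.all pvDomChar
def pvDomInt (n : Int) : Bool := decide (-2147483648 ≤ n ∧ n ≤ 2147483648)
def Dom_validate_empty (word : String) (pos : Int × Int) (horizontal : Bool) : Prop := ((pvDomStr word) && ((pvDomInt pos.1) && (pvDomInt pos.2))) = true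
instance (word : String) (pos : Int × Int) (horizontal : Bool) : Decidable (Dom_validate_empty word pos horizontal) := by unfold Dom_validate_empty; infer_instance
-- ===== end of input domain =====

-- B replaces A's per-cell loop with a closed-form arithmetic span check (simpler; return value identical).

-- ===== PORT A =====
-- A's for-loop over range(len(word)), carrying (row, column) state; early return on (7,7).
def veLoopA (horizontal : Bool) : Nat → Int → Int → Bool
  | 0, _, _ => false
  | n + 1, row, column =>
    if row = 7 ∧ column = 7 then true
    else veLoopA horizontal n (row + (if ¬horizontal then 1 else 0))
                             (column + (if horizontal then 1 else 0))

def validate_empty (word : String) (pos : Int × Int) (horizontal : Bool) : Bool :=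
  veLoopA horizontal word.toList.length pos.1 pos.2

-- ===== PORT B =====
def validate_empty_alt (word : String) (pos : Int × Int) (horizontal : Bool) : Bool :=
  let n : Int := word.toList.length
  if horizontal then
    decide (pos.1 = 7 ∧ pos.2 ≤ 7 ∧ 7 ≤ pos.2 + n - 1)
  else
    decide (pos.2 = 7 ∧ pos.1 ≤ 7 ∧ 7 ≤ pos.1 + n - 1)

-- ===== PRECONDITION & SPEC =====
def Spec_validate_empty (word : String) (pos : Int × Int) (horizontal : Bool) (out : Bool) : Prop := out = validate_empty_alt word pos horizontal
instance (word : String) (pos : Int × Int) (horizontal : Bool) (out : Bool) : Decidable (Spec_validate_empty word pos horizontal out) := by unfold Spec_validate_empty; infer_instance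

-- ===== CLAIM (what is proved, stated in full; the proofs are below) =====
def Claim_equal_validate_empty : Prop := ∀ (word : String) (pos : Int × Int) (horizontal : Bool), Dom_validate_empty word pos horizontal → Spec_validate_empty word pos horizontal (validate_empty word pos horizontal)

-- ===== LEMMAS AND PROOFS =====
theorem veLoopA_horiz (n : Nat) : ∀ (r c : Int),
    veLoopA true n r c = decide (r = 7 ∧ c ≤ 7 ∧ 7 ≤ c + n - 1) := by
  induction n with
  | zero => intro r c; simp [veLoopA]
  | succ k ih =>
    intro r c
    by_cases h : r = 7 ∧ c = 7
    · simp [veLoopA, h]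
    · simp only [veLoopA, if_neg h, ih, decide_eq_decide]
      push_cast
      norm_num
      omega

theorem veLoopA_vert (n : Nat) : ∀ (r c : Int),
    veLoopA false n r c = decide (c = 7 ∧ r ≤ 7 ∧ 7 ≤ r + n - 1) := by
  induction n with
  | zero => intro r c; simp [veLoopA]
  | succ k ih =>
    intro r c
    by_cases h : r = 7 ∧ c = 7
    · simp [veLoopA, h]
    · simp only [veLoopA, if_neg h, ih, decide_eq_decide]
      push_cast
      norm_num
      omega

-- ===== VERDICT (by name: the statement is the Claim_ definition above) =====
theorem validate_empty_spec : Claim_equal_validate_empty := by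
  intro word pos horizontal _
  unfold Spec_validate_empty validate_empty validate_empty_alt
  cases horizontal
  · simpa using veLoopA_vert word.toList.length pos.1 pos.2
  · simpa using veLoopA_horiz word.toList.length pos.1 pos.2
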